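-- pv_equiv track=rewrite | github.com/tcpiplab/AblitaFuzzer | analysis_engine/remediation_advisor.py | generate_feasibility_recommendations
-- ===== SOURCE A (Python) =====
-- from typing import Dict, List, Optional, Tuple
--
-- def generate_feasibility_recommendations(constraints: List[str]) -> List[str]:
--     """Generate recommendations to improve implementation feasibility."""
--     recommendations = []
--
--     if any('complexity' in constraint.lower() for constraint in constraints):
--         recommendations.append('Consider engaging external security consultants for complex implementations')
--         recommendations.append('Implement in phases to reduce complexity and risk')
--
--     if any('resource' in constraint.lower() for constraint in constraints):
--         recommendations.append('Prioritize high-impact, low-cost recommendations first')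
--         recommendations.append('Consider cloud-based security solutions to reduce resource requirements')
--
--     if any('organizational' in constraint.lower() for constraint in constraints):
--         recommendations.append('Invest in security training and awareness programs')
--         recommendations.append('Establish security champions program to drive cultural change')
--
--     return recommendations
-- ===== SOURCE B (Python) =====
-- _RECS = [
--     'Consider engaging external security consultants for complex implementations',
--     'Implement in phases to reduce complexity and risk',
--     'Prioritize high-impact, low-cost recommendations first',
--     'Consider cloud-based security solutions to reduce resource requirements',
--     'Invest in security training and awareness programs',
--     'Establish security champions program to drive cultural change',
-- ]
--
-- def _mask(constraints):
--     """Fold the constraint list into a 3-bit keyword mask, stopping early once all bits are set."""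
--     acc = 0
--     for c in constraints:
--         if acc == 7:
--             break
--         low = c.lower()
--         acc |= (('complexity' in low) | (('resource' in low) << 1)
--                 | (('organizational' in low) << 2))
--     return acc
--
-- def generate_feasibility_recommendations(constraints):
--     """Generate recommendations to improve implementation feasibility."""
--     mask = _mask(constraints)
--     out = []
--     for i in range(3):
--         if (mask >> i) & 1:
--             out += _RECS[2 * i:2 * i + 2]
--     return out
-- ===== Notes on version B (the rewrite author's own statement) =====
-- stated objective: alternative
-- what changed: Replaces the three separate any()-scans with a single fold of the constraints into a 3-bit keyword mask (with an early break once all bits are set), then decodes the mask bit by bit into slices of a flat recommendation array.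
import Mathlib
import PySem

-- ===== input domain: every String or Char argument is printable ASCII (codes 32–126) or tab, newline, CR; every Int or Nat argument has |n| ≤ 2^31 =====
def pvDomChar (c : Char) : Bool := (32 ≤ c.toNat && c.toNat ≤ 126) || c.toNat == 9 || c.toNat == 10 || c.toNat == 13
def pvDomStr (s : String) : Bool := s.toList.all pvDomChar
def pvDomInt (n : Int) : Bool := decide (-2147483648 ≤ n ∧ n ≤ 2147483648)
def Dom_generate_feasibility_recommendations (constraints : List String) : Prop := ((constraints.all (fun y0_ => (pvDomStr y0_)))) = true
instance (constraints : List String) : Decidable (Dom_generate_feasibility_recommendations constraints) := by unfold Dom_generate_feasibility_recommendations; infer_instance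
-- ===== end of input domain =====

-- B folds the constraints once into a 3-bit keyword mask (early exit at 7) and decodes the
-- mask bit by bit into slices of a flat recommendation array, instead of A's three any()-scans (objective: alternative).

-- ===== PORT A =====
def generate_feasibility_recommendations (constraints : List String) : List String :=
  let recommendations : List String := []
  let recommendations :=
    if constraints.any (fun constraint => PySem.Str.isIn "complexity" (PySem.Str.lower constraint)) then
      (recommendations ++ ["Consider engaging external security consultants for complex implementations"])
        ++ ["Implement in phases to reduce complexity and risk"]
    else recommendations
  let recommendations :=
    if constraints.any (fun constraint => PySem.Str.isIn "resource" (PySem.Str.lower constraint)) then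
      (recommendations ++ ["Prioritize high-impact, low-cost recommendations first"])
        ++ ["Consider cloud-based security solutions to reduce resource requirements"]
    else recommendations
  let recommendations :=
    if constraints.any (fun constraint => PySem.Str.isIn "organizational" (PySem.Str.lower constraint)) then
      (recommendations ++ ["Invest in security training and awareness programs"])
        ++ ["Establish security champions program to drive cultural change"]
    else recommendations
  recommendations

-- ===== PORT B =====
def pvRECS : List String :=
  ["Consider engaging external security consultants for complex implementations",
   "Implement in phases to reduce complexity and risk",
   "Prioritize high-impact, low-cost recommendations first",
   "Consider cloud-based security solutions to reduce resource requirements",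
   "Invest in security training and awareness programs",
   "Establish security champions program to drive cultural change"]

-- _mask: the mask stays in 0..7, so Nat carries Python's int here exactly; the Python
-- for-loop with 'break' over constraints becomes the obvious structural recursion over the
-- list with the same acc, the break = returning acc (exact).
def pvMaskRec (constraints : List String) (acc : Nat) : Nat :=
  match constraints with
  | [] => acc
  | c :: rest =>
    if acc = 7 then acc else
    let low := PySem.Str.lower c
    let bits := (if PySem.Str.isIn "complexity" low then 1 else 0)
            ||| ((if PySem.Str.isIn "resource" low then 1 else 0) <<< 1)
            ||| ((if PySem.Str.isIn "organizational" low then 1 else 0) <<< 2)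
    pvMaskRec rest (acc ||| bits)

def generate_feasibility_recommendations_alt (constraints : List String) : List String :=
  let mask := pvMaskRec constraints 0
  (PySem.List.pyRange 0 3 1).foldl (fun out i =>
    if (mask >>> i.toNat) &&& 1 = 1 then
      out ++ PySem.List.slice pvRECS (some (2 * i)) (some (2 * i + 2))
    else out) []

-- ===== PRECONDITION & SPEC =====
def Spec_generate_feasibility_recommendations (constraints : List String) (out : List String) : Prop := out = generate_feasibility_recommendations_alt constraints
instance (constraints : List String) (out : List String) : Decidable (Spec_generate_feasibility_recommendations constraints out) := by unfold Spec_generate_feasibility_recommendations; infer_instance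

-- ===== CLAIM (what is proved, stated in full; the proofs are below) =====
def Claim_equal_generate_feasibility_recommendations : Prop := ∀ (constraints : List String), Dom_generate_feasibility_recommendations constraints → Spec_generate_feasibility_recommendations constraints (generate_feasibility_recommendations constraints)

-- ===== LEMMAS AND PROOFS =====

-- closed form of the any()-bits of a constraint list as a mask
def pvM (constraints : List String) : Nat :=
  (if constraints.any (fun c => PySem.Str.isIn "complexity" (PySem.Str.lower c)) then 1 else 0)
  ||| (if constraints.any (fun c => PySem.Str.isIn "resource" (PySem.Str.lower c)) then 2 else 0)
  ||| (if constraints.any (fun c => PySem.Str.isIn "organizational" (PySem.Str.lower c)) then 4 else 0)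

theorem pvM_lt (constraints : List String) : pvM constraints < 8 := by
  unfold pvM; split_ifs <;> decide

theorem pv_lor_lt : ∀ a < 8, ∀ b < 8, (a ||| b : Nat) < 8 := by decide

theorem pv_bits_lt (b0 b1 b2 : Bool) :
    ((if b0 = true then 1 else 0) ||| ((if b1 = true then 1 else 0) <<< 1)
      ||| ((if b2 = true then 1 else 0) <<< 2) : Nat) < 8 := by
  revert b0 b1 b2; decide

theorem pv_merge (acc : Nat) (b0 b1 b2 y0 y1 y2 : Bool) :
    acc ||| ((if b0 = true then 1 else 0) ||| ((if b1 = true then 1 else 0) <<< 1)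
        ||| ((if b2 = true then 1 else 0) <<< 2))
      ||| ((if y0 = true then 1 else 0) ||| (if y1 = true then 2 else 0) ||| (if y2 = true then 4 else 0))
    = acc ||| ((if (b0 || y0) = true then 1 else 0) ||| (if (b1 || y1) = true then 2 else 0)
        ||| (if (b2 || y2) = true then 4 else 0)) := by
  cases b0 <;> cases b1 <;> cases b2 <;> cases y0 <;> cases y1 <;> cases y2 <;>
    (rw [Nat.lor_assoc]; congr 1)

-- the early-exit fold computes acc OR the three any()-bits
theorem pvMaskRec_eq (constraints : List String) :
    ∀ acc, acc < 8 → pvMaskRec constraints acc = acc ||| pvM constraints := by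
  induction constraints with
  | nil =>
    intro acc _
    have h2 : pvM [] = 0 := by unfold pvM; simp
    simp [pvMaskRec, h2]
  | cons c rest ih =>
    intro acc hacc
    by_cases h7 : acc = 7
    · subst h7
      have h1 : pvMaskRec (c :: rest) 7 = 7 := by simp [pvMaskRec]
      rw [h1]
      have h := pvM_lt (c :: rest)
      revert h
      generalize pvM (c :: rest) = m
      revert m
      decide
    · have h1 : pvMaskRec (c :: rest) acc =
          pvMaskRec rest (acc |||
            ((if PySem.Str.isIn "complexity" (PySem.Str.lower c) then 1 else 0)
              ||| ((if PySem.Str.isIn "resource" (PySem.Str.lower c) then 1 else 0) <<< 1)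
              ||| ((if PySem.Str.isIn "organizational" (PySem.Str.lower c) then 1 else 0) <<< 2))) := by
        simp only [pvMaskRec, if_neg h7]
      rw [h1, ih _ (pv_lor_lt _ hacc _ (pv_bits_lt _ _ _))]
      unfold pvM
      simp only [List.any_cons]
      exact pv_merge acc _ _ _ _ _ _

-- ===== VERDICT (by name: the statement is the Claim_ definition above) =====
theorem generate_feasibility_recommendations_spec : Claim_equal_generate_feasibility_recommendations := by
  intro constraints _
  unfold Spec_generate_feasibility_recommendations
  unfold generate_feasibility_recommendations generate_feasibility_recommendations_alt
  rw [pvMaskRec_eq constraints 0 (by decide)]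
  unfold pvM
  cases hc0 : constraints.any (fun c => PySem.Str.isIn "complexity" (PySem.Str.lower c)) <;>
  cases hc1 : constraints.any (fun c => PySem.Str.isIn "resource" (PySem.Str.lower c)) <;>
  cases hc2 : constraints.any (fun c => PySem.Str.isIn "organizational" (PySem.Str.lower c)) <;>
  simp only [Bool.false_eq_true, ite_true, ite_false] <;>
  rfl
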